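-- pv_equiv track=rewrite | github.com/TaiYou-TW/SymWP | scripts/pipeline_runner.py | remove_incomplete_args
-- ===== SOURCE A (Python) =====
-- def remove_incomplete_args(args: set) -> set:
--     """
--     Logs may not complete, delete those not have enough args.
--     Args:
--         args (set): Set of tuples containing symbolic arguments.
--     Returns:
--         set: Filtered set of tuples with only complete arguments.
--     """
--     max = -1
--     if len(args) > 0:
--         for arg in args:
--             if len(arg) > max:
--                 max = len(arg)
--         args = [arg for arg in args if len(arg) == max]
--
--     return args
-- ===== SOURCE B (Python) =====
-- def remove_incomplete_args(args: set) -> set: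
--     """Single-pass variant: track the best length and the running list of
--     tuples of that length, resetting the list when a longer tuple appears."""
--     if len(args) == 0:
--         return args
--     best_len = -1
--     best = []
--     for arg in args:
--         l = len(arg)
--         if l > best_len:
--             best_len = l
--             best = [arg]
--         elif l == best_len:
--             best.append(arg)
--     return best
-- ===== Notes on version B (the rewrite author's own statement) =====
-- stated objective: alternative
-- what changed: B makes a single pass keeping the current maximum length together with the running list of tuples of that length (resetting it when a longer tuple appears), instead of A's max-finding loop followed by a second filtering pass.
-- outside the precondition, e.g. on remove_incomplete_args(set()): A returns set(), B returns set()
import Mathlib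
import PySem

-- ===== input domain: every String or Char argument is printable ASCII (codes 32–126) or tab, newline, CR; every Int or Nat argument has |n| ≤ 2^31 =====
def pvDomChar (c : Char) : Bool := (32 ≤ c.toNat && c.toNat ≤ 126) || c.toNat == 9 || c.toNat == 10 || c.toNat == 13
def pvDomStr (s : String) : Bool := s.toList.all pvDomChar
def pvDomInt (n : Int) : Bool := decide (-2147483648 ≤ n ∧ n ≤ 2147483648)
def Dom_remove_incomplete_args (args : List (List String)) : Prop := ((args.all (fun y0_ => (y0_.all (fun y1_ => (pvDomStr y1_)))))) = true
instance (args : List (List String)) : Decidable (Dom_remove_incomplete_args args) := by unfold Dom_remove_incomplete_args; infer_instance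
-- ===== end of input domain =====

-- B replaces A's two passes (max-finding loop, then a filtering comprehension)
-- by ONE pass maintaining the best length and the running list of tuples of
-- that length; objective: alternative single-pass decomposition (same cost).

-- ===== PORT A =====
-- the `for arg in args: if len(arg) > max: max = len(arg)` loop
def pvAMax (args : List (List String)) : Int :=
  args.foldl (fun m arg => if (arg.length : Int) > m then (arg.length : Int) else m) (-1)

def remove_incomplete_args (args : List (List String)) : List (List String) :=
  if args.length > 0 then
    let m := pvAMax args
    args.filter (fun arg => (arg.length : Int) == m)
  else args

-- ===== PORT B =====
-- the single loop of Source B over state (best_len, best)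
def pvBLoop (xs : List (List String)) (st : Int × List (List String)) :
    Int × List (List String) :=
  xs.foldl (fun st arg =>
    if (arg.length : Int) > st.1 then ((arg.length : Int), [arg])
    else if (arg.length : Int) == st.1 then (st.1, st.2 ++ [arg])
    else st) st

def remove_incomplete_args_alt (args : List (List String)) : List (List String) :=
  if args.length = 0 then args
  else (pvBLoop args (-1, [])).2

-- ===== PRECONDITION & SPEC =====
-- Pre_ excludes the empty set, on which A returns the original set object (not a
-- list), a value outside the declared return type list[tuple[str, ...]].
def Pre_remove_incomplete_args (args : List (List String)) : Prop := args ≠ []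
instance (args : List (List String)) : Decidable (Pre_remove_incomplete_args args) := by unfold Pre_remove_incomplete_args; infer_instance
def pvWitness_remove_incomplete_args : List (List String) := [["a"], ["b", "c"]]

def Spec_remove_incomplete_args (args : List (List String)) (out : List (List String)) : Prop := out = remove_incomplete_args_alt args
instance (args : List (List String)) (out : List (List String)) : Decidable (Spec_remove_incomplete_args args out) := by unfold Spec_remove_incomplete_args; infer_instance

-- ===== CLAIM (what is proved, stated in full; the proofs are below) =====
def Claim_equal_remove_incomplete_args : Prop := ∀ (args : List (List String)), Dom_remove_incomplete_args args → Pre_remove_incomplete_args args → Spec_remove_incomplete_args args (remove_incomplete_args args)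

-- ===== LEMMAS AND PROOFS =====

-- pvAMax over p ++ xs, one step at a time
theorem pvAMax_append_singleton (p : List (List String)) (x : List String) :
    pvAMax (p ++ [x]) =
      (if (x.length : Int) > pvAMax p then (x.length : Int) else pvAMax p) := by
  simp [pvAMax, List.foldl_append]

-- every length in p is bounded by pvAMax p
theorem le_pvAMax (p : List (List String)) (a : List String) (ha : a ∈ p) :
    (a.length : Int) ≤ pvAMax p := by
  have key : ∀ (l : List (List String)) (c : Int),
      c ≤ l.foldl (fun m arg => if (arg.length : Int) > m then (arg.length : Int) else m) c ∧
      ∀ a ∈ l, (a.length : Int) ≤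
        l.foldl (fun m arg => if (arg.length : Int) > m then (arg.length : Int) else m) c := by
    intro l
    induction l with
    | nil => intro c; simp
    | cons x xs ih =>
      intro c
      refine ⟨?_, ?_⟩
      · simp only [List.foldl_cons]
        have h := (ih (if (x.length : Int) > c then (x.length : Int) else c)).1
        split_ifs at h ⊢ with h1
        · omega
        · exact h
      · intro a ha
        simp only [List.foldl_cons]
        rcases List.mem_cons.mp ha with rfl | hmem
        · have h := (ih (if (a.length : Int) > c then (a.length : Int) else c)).1
          split_ifs at h ⊢ with h1
          · exact h
          · omega
        · exact (ih _).2 a hmem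
  exact (key p (-1)).2 a ha

-- loop invariant: processing the suffix xs from the state built out of prefix p
theorem pvBLoop_spec (xs : List (List String)) :
    ∀ (p : List (List String)),
      pvBLoop xs (pvAMax p, p.filter (fun a => (a.length : Int) == pvAMax p)) =
        (pvAMax (p ++ xs),
         (p ++ xs).filter (fun a => (a.length : Int) == pvAMax (p ++ xs))) := by
  induction xs with
  | nil => intro p; simp [pvBLoop]
  | cons x xs ih =>
    intro p
    have hstep := pvAMax_append_singleton p x
    by_cases h1 : (x.length : Int) > pvAMax p
    · -- longer tuple: reset
      have hmax : pvAMax (p ++ [x]) = (x.length : Int) := by rw [hstep]; simp [h1]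
      have hfil : (p ++ [x]).filter (fun a => (a.length : Int) == pvAMax (p ++ [x])) = [x] := by
        rw [hmax]
        rw [List.filter_append]
        have : p.filter (fun a => (a.length : Int) == (x.length : Int)) = [] := by
          rw [List.filter_eq_nil_iff]
          intro a ha
          have := le_pvAMax p a ha
          simp only [beq_iff_eq]
          intro hc; omega
        simp [this]
      have : pvBLoop (x :: xs) (pvAMax p, p.filter (fun a => (a.length : Int) == pvAMax p)) =
          pvBLoop xs ((x.length : Int), [x]) := by
        simp [pvBLoop, h1]
      rw [this]
      have h2 := ih (p ++ [x])
      rw [hfil, hmax] at h2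
      simpa using h2
    · by_cases h2 : (x.length : Int) = pvAMax p
      · -- tie: append
        have hmax : pvAMax (p ++ [x]) = pvAMax p := by rw [hstep]; simp [h1]
        have hfil : (p ++ [x]).filter (fun a => (a.length : Int) == pvAMax (p ++ [x])) =
            p.filter (fun a => (a.length : Int) == pvAMax p) ++ [x] := by
          rw [hmax, List.filter_append]
          simp [h2]
        have hst : pvBLoop (x :: xs) (pvAMax p, p.filter (fun a => (a.length : Int) == pvAMax p)) =
            pvBLoop xs (pvAMax p, p.filter (fun a => (a.length : Int) == pvAMax p) ++ [x]) := by
          simp [pvBLoop, h2]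
        rw [hst]
        have h3 := ih (p ++ [x])
        rw [hfil, hmax] at h3
        simpa using h3
      · -- shorter: unchanged
        have hmax : pvAMax (p ++ [x]) = pvAMax p := by rw [hstep]; simp [h1]
        have hfil : (p ++ [x]).filter (fun a => (a.length : Int) == pvAMax (p ++ [x])) =
            p.filter (fun a => (a.length : Int) == pvAMax p) := by
          rw [hmax, List.filter_append]
          simp [h2]
        have hst : pvBLoop (x :: xs) (pvAMax p, p.filter (fun a => (a.length : Int) == pvAMax p)) =
            pvBLoop xs (pvAMax p, p.filter (fun a => (a.length : Int) == pvAMax p)) := by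
          simp [pvBLoop, h1, h2]
        rw [hst]
        have h3 := ih (p ++ [x])
        rw [hfil, hmax] at h3
        simpa using h3

-- ===== VERDICT (by name: the statement is the Claim_ definition above) =====
theorem remove_incomplete_args_spec : Claim_equal_remove_incomplete_args := by
  intro args _ _
  unfold Spec_remove_incomplete_args remove_incomplete_args remove_incomplete_args_alt
  cases args with
  | nil => simp
  | cons x xs =>
    have h := pvBLoop_spec (x :: xs) []
    simp only [List.nil_append] at h
    simp [pvAMax, pvBLoop] at h ⊢
    rw [h]
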